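-- pv_equiv track=rewrite | github.com/eliottcassidy2000/math | 04-computation/proof_n8_v2.py | ham_sub
-- ===== SOURCE A (Python) =====
-- N = 8
--
-- def ham_sub(T_flat, verts):
--     """H(T[verts]) for a subset of vertices."""
--     m = len(verts)
--     if m <= 1:
--         return 1
--     full = (1 << m) - 1
--     dp = [[0] * m for _ in range(1 << m)]
--     for vi in range(m):
--         dp[1 << vi][vi] = 1
--     for mask in range(1, 1 << m):
--         for li in range(m):
--             c = dp[mask][li]
--             if c == 0:
--                 continue
--             for ni in range(m):
--                 if mask & (1 << ni):
--                     continue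
--                 if T_flat[verts[li] * N + verts[ni]]:
--                     dp[mask | (1 << ni)][ni] += c
--     return sum(dp[full])
-- ===== SOURCE B (Python) =====
-- from functools import lru_cache
--
-- N = 8
--
-- def ham_sub(T_flat, verts):
--     """H(T[verts]) for a subset of vertices, by memoized DFS over (current, visited)."""
--     m = len(verts)
--     if m <= 1:
--         return 1
--     full = (1 << m) - 1
--
--     @lru_cache(maxsize=None)
--     def dfs(cur, visited):
--         if visited == full:
--             return 1
--         total = 0
--         for ni in range(m):
--             if not visited & (1 << ni) and T_flat[verts[cur] * N + verts[ni]]: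
--                 total += dfs(ni, visited | (1 << ni))
--         return total
--
--     return sum(dfs(vi, 1 << vi) for vi in range(m))
-- ===== Notes on version B (the rewrite author's own statement) =====
-- stated objective: alternative
-- what changed: A builds the full 2^m x m bottom-up DP table indexed by (visited mask, last vertex); B counts the same Hamiltonian paths by a recursive DFS dfs(cur, visited) from each start vertex, memoized with lru_cache, so it maintains only the current vertex and visited set and touches only reachable states.
import Mathlib
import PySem

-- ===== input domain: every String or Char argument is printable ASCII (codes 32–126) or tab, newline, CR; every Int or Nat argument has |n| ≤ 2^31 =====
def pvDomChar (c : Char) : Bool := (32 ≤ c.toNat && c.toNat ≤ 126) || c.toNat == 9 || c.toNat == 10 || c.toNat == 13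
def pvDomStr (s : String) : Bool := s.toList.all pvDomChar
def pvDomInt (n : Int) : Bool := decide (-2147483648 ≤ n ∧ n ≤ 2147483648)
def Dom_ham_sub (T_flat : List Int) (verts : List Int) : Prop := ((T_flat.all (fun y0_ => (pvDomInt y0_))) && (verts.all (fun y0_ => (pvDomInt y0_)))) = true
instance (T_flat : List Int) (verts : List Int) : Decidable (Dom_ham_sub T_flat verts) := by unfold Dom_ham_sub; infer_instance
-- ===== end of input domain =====

-- B replaces A's bottom-up 2^m × m DP table by a recursive DFS over (current vertex, visited set)
-- (memoized in Python with lru_cache); same return value, different decomposition ("alternative").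

-- ===== PORT A =====
-- `T_flat[verts[i]*N + verts[j]]` is truthy (N = 8); pyGetD is exact under Pre_ (all indices in range).
def pvAdj (T_flat : List Int) (verts : List Int) (i j : Nat) : Bool :=
  PySem.List.pyGetD T_flat
    (PySem.List.pyGetD verts (i : Int) 0 * 8 + PySem.List.pyGetD verts (j : Int) 0) 0 ≠ 0

def ham_sub (T_flat : List Int) (verts : List Int) : Int :=
  let m := verts.length
  if m ≤ 1 then 1
  else
    let full := 2 ^ m - 1
    -- dp = [[0]*m for _ in range(1 << m)]: the rectangular table is stored row-major,
    -- dp[mask][li] at index mask*m + li (reads/writes always in bounds while A runs)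
    let dp0 : Array Int := Array.replicate (2 ^ m * m) 0
    -- for vi in range(m): dp[1 << vi][vi] = 1
    let dp1 := (List.range m).foldl (fun dp vi => dp.setIfInBounds (2 ^ vi * m + vi) 1) dp0
    -- for mask in range(1, 1 << m): …  (mask = i + 1)
    let dp2 := (List.range (2 ^ m - 1)).foldl (fun dp i =>
      let mask := i + 1
      (List.range m).foldl (fun dp li =>
        let c := dp.getD (mask * m + li) 0
        if c = 0 then dp
        else (List.range m).foldl (fun dp ni =>
          if mask.testBit ni then dp
          else if pvAdj T_flat verts li ni then
            dp.setIfInBounds ((mask ||| 2 ^ ni) * m + ni)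
              (dp.getD ((mask ||| 2 ^ ni) * m + ni) 0 + c)
          else dp) dp) dp) dp1
    (List.range m).foldl (fun s li => s + dp2.getD (full * m + li) 0) 0

-- ===== PORT B =====
-- dfs(cur, visited) of Source B. Its lru_cache is modelled by an explicitly threaded cache
-- keyed by cur*2^m + visited; the fuel argument only bounds the recursion depth (the cached
-- value of a state never depends on it: along all of ham_sub_alt's calls fuel is exactly
-- m - popcount(visited), so the 0-fuel branch is unreachable).
def pvDfsM (T_flat : List Int) (verts : List Int) (m full : Nat) :
    Nat → Nat → Nat → Array (Option Int) → Int × Array (Option Int)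
  | fuel, visited, cur, cache =>
    match cache.getD (cur * 2 ^ m + visited) none with
    | some v => (v, cache)
    | none =>
      let rc : Int × Array (Option Int) :=
        if visited = full then (1, cache)
        else
          match fuel with
          | 0 => (0, cache)
          | f + 1 =>
            (List.range m).foldl
              (fun tc ni =>
                if (!visited.testBit ni) && pvAdj T_flat verts cur ni then
                  let vc := pvDfsM T_flat verts m full f (visited ||| 2 ^ ni) ni tc.2
                  (tc.1 + vc.1, vc.2)
                else tc) (0, cache)
      (rc.1, rc.2.setIfInBounds (cur * 2 ^ m + visited) (some rc.1))

def ham_sub_alt (T_flat : List Int) (verts : List Int) : Int :=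
  let m := verts.length
  if m ≤ 1 then 1
  else
    let full := 2 ^ m - 1
    let cache0 : Array (Option Int) := Array.replicate (m * 2 ^ m) none
    ((List.range m).foldl (fun sc vi =>
        let vc := pvDfsM T_flat verts m full (m - 1) (2 ^ vi) vi sc.2
        (sc.1 + vc.1, vc.2)) ((0 : Int), cache0)).1

-- ===== PRECONDITION & SPEC =====
-- Pre_ excludes exactly the inputs on which the Python A raises IndexError: when m ≥ 2 the DP
-- evaluates T_flat[verts[li]*8 + verts[ni]] for every pair of distinct positions li ≠ ni
-- (and only those), so A returns normally iff all those indices are in range.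
def Pre_ham_sub (T_flat : List Int) (verts : List Int) : Prop :=
  verts.length ≤ 1 ∨
    ∀ li < verts.length, ∀ ni < verts.length, li ≠ ni →
      PySem.Raise.InRange T_flat.length (verts.getD li 0 * 8 + verts.getD ni 0)
instance (T_flat : List Int) (verts : List Int) : Decidable (Pre_ham_sub T_flat verts) := by
  unfold Pre_ham_sub; infer_instance

def pvWitness_ham_sub : List Int × List Int := ([1, 0, 1, 1, 0, 1, 1, 1, 1], [0, 1])

def Spec_ham_sub (T_flat : List Int) (verts : List Int) (out : Int) : Prop := out = ham_sub_alt T_flat verts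
instance (T_flat : List Int) (verts : List Int) (out : Int) : Decidable (Spec_ham_sub T_flat verts out) := by unfold Spec_ham_sub; infer_instance

-- ===== CLAIM (what is proved, stated in full; the proofs are below) =====
def Claim_equal_ham_sub : Prop := ∀ (T_flat : List Int) (verts : List Int), Dom_ham_sub T_flat verts → Pre_ham_sub T_flat verts → Spec_ham_sub T_flat verts (ham_sub T_flat verts)

-- ===== LEMMAS AND PROOFS =====

-- ---- basic bit lemmas ----
lemma pv_xor_lt {mask li : Nat} (h : mask.testBit li = true) : mask ^^^ 2 ^ li < mask := by
  apply Nat.lt_of_testBit li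
  · simp [Nat.testBit_xor, h]
  · exact h
  · intro j hj
    simp [Nat.testBit_xor, Nat.testBit_two_pow, Nat.ne_of_lt hj]

lemma pv_xor_or {mask li : Nat} (h : mask.testBit li = true) :
    (mask ^^^ 2 ^ li) ||| 2 ^ li = mask := by
  apply Nat.eq_of_testBit_eq
  intro j
  by_cases hj : j = li
  · subst hj; simp [Nat.testBit_or, Nat.testBit_xor, Nat.testBit_two_pow, h]
  · simp [Nat.testBit_or, Nat.testBit_xor, Nat.testBit_two_pow, Ne.symm hj]

lemma pv_xor_bit {mask li : Nat} : (mask ^^^ 2 ^ li).testBit li = !mask.testBit li := by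
  simp [Nat.testBit_xor, Bool.xor_comm]

lemma pv_or_xor {w li : Nat} (h : w.testBit li = false) :
    (w ||| 2 ^ li) ^^^ 2 ^ li = w := by
  apply Nat.eq_of_testBit_eq
  intro j
  by_cases hj : j = li
  · subst hj; simp [Nat.testBit_or, Nat.testBit_xor, Nat.testBit_two_pow, h]
  · simp [Nat.testBit_or, Nat.testBit_xor, Nat.testBit_two_pow, Ne.symm hj]

lemma pv_or_bit {w li : Nat} : (w ||| 2 ^ li).testBit li = true := by
  simp [Nat.testBit_or, Nat.testBit_two_pow]

lemma pv_xor_ne_zero {mask li : Nat} (h : mask ≠ 2 ^ li) : mask ^^^ 2 ^ li ≠ 0 := by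
  intro h0
  exact h (by simpa using Nat.xor_eq_zero.mp h0)

-- ---- the path-count characterisation P(mask, li): number of directed paths that visit
-- exactly the vertices of `mask` and end at `li` ----
def pvP (T_flat : List Int) (verts : List Int) (m : Nat) : Nat → Nat → Int
  | mask, li =>
    if h : mask.testBit li then
      if mask = 2 ^ li then 1
      else ∑ pj ∈ Finset.range m,
        (if pvAdj T_flat verts pj li then pvP T_flat verts m (mask ^^^ 2 ^ li) pj else 0)
    else 0
  termination_by mask _ => mask
  decreasing_by exact pv_xor_lt h

lemma pvP_not_bit {T V : List Int} {m mask li : Nat} (h : mask.testBit li = false) :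
    pvP T V m mask li = 0 := by
  rw [pvP]; simp [h]

lemma pvP_pow {T V : List Int} {m li : Nat} : pvP T V m (2 ^ li) li = 1 := by
  rw [pvP]; simp [Nat.testBit_two_pow_self]

lemma pvP_step {T V : List Int} {m mask li : Nat} (h1 : mask.testBit li = true)
    (h2 : mask ≠ 2 ^ li) :
    pvP T V m mask li =
      ∑ pj ∈ Finset.range m,
        (if pvAdj T V pj li then pvP T V m (mask ^^^ 2 ^ li) pj else 0) := by
  rw [pvP]; simp [h1, h2]

-- ---- proof-side references: the functional table and the pure (cache-free) DFS ----
def pvUpd (dp : Nat → Nat → Int) (a0 b0 : Nat) (v : Int) : Nat → Nat → Int :=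
  fun a b => if a = a0 ∧ b = b0 then v else dp a b

def pvDfs (T_flat : List Int) (verts : List Int) (m full : Nat) : Nat → Nat → Nat → Int
  | 0, visited, _ => if visited = full then 1 else 0
  | f + 1, visited, cur =>
    if visited = full then 1
    else (List.range m).foldl
      (fun total ni =>
        if (!visited.testBit ni) && pvAdj T_flat verts cur ni then
          total + pvDfs T_flat verts m full f (visited ||| 2 ^ ni) ni
        else total) 0

-- ---- named forms of A's functional loops (the proof's model of the table updates) ----
def pvStepNi (T V : List Int) (mask li : Nat) (c : Int) (dp : Nat → Nat → Int) (ni : Nat) :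
    Nat → Nat → Int :=
  if mask.testBit ni then dp
  else if pvAdj T V li ni then
    pvUpd dp (mask ||| 2 ^ ni) ni (dp (mask ||| 2 ^ ni) ni + c)
  else dp

def pvStepLi (T V : List Int) (m mask : Nat) (dp : Nat → Nat → Int) (li : Nat) :
    Nat → Nat → Int :=
  let c := dp mask li
  if c = 0 then dp else (List.range m).foldl (pvStepNi T V mask li c) dp

def pvDpInit (m : Nat) : Nat → Nat → Int :=
  (List.range m).foldl (fun dp vi => pvUpd dp (2 ^ vi) vi 1) (fun _ _ => 0)

def pvDpA (T V : List Int) (m M : Nat) : Nat → Nat → Int :=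
  (List.range M).foldl (fun dp i => (List.range m).foldl (pvStepLi T V m (i + 1)) dp) (pvDpInit m)

-- named forms of A's array loops (definitionally equal to the lambdas in ham_sub)
def pvAInner (T V : List Int) (m mask li : Nat) (c : Int) (dp : Array Int) (ni : Nat) : Array Int :=
  if mask.testBit ni then dp
  else if pvAdj T V li ni then
    dp.setIfInBounds ((mask ||| 2 ^ ni) * m + ni) (dp.getD ((mask ||| 2 ^ ni) * m + ni) 0 + c)
  else dp

def pvAMid (T V : List Int) (m mask : Nat) (dp : Array Int) (li : Nat) : Array Int :=
  let c := dp.getD (mask * m + li) 0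
  if c = 0 then dp else (List.range m).foldl (pvAInner T V m mask li c) dp

def pvADp (T V : List Int) (m M : Nat) : Array Int :=
  (List.range M).foldl (fun dp i => (List.range m).foldl (pvAMid T V m (i + 1)) dp)
    ((List.range m).foldl (fun dp vi => dp.setIfInBounds (2 ^ vi * m + vi) 1)
      (Array.replicate (2 ^ m * m) 0))

lemma pv_ham_unfold (T V : List Int) (h : ¬ V.length ≤ 1) :
    ham_sub T V = (List.range V.length).foldl
      (fun s li => s + (pvADp T V V.length (2 ^ V.length - 1)).getD
        ((2 ^ V.length - 1) * V.length + li) 0) 0 := by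
  unfold ham_sub pvADp pvAMid pvAInner
  rw [if_neg h]

-- ---- pointwise evaluation of one loop step ----
lemma pvUpd_apply (dp : Nat → Nat → Int) (a0 b0 : Nat) (v : Int) (a b : Nat) :
    pvUpd dp a0 b0 v a b = if a = a0 ∧ b = b0 then v else dp a b := rfl

lemma pvStepNi_apply (T V : List Int) (mask li : Nat) (c : Int) (dp : Nat → Nat → Int)
    (ni a b : Nat) :
    pvStepNi T V mask li c dp ni a b
      = if mask.testBit ni then dp a b
        else if pvAdj T V li ni then
          (if a = mask ||| 2 ^ ni ∧ b = ni then dp (mask ||| 2 ^ ni) ni + c else dp a b)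
        else dp a b := by
  unfold pvStepNi pvUpd
  by_cases h1 : mask.testBit ni
  · simp [h1]
  · by_cases h2 : pvAdj T V li ni <;> simp [h1, h2]

lemma pvStepLi_apply (T V : List Int) (m mask : Nat) (dp : Nat → Nat → Int) (li a b : Nat) :
    pvStepLi T V m mask dp li a b
      = if dp mask li = 0 then dp a b
        else (List.range m).foldl (pvStepNi T V mask li (dp mask li)) dp a b := by
  unfold pvStepLi
  by_cases h : dp mask li = 0 <;> simp [h]

-- ---- characterising A's loops ----
lemma pv_inner_eq (T V : List Int) (mask li : Nat) (c : Int) (n : Nat) (dp : Nat → Nat → Int) :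
    ∀ a b, ((List.range n).foldl (pvStepNi T V mask li c) dp) a b
      = dp a b + (if b < n ∧ mask.testBit b = false ∧ a = mask ||| 2 ^ b ∧
          pvAdj T V li b = true then c else 0) := by
  induction n with
  | zero => intro a b; simp
  | succ n ih =>
    intro a b
    rw [List.range_succ, List.foldl_append, List.foldl_cons, List.foldl_nil, pvStepNi_apply]
    by_cases h1 : mask.testBit n
    · rw [if_pos h1, ih a b]
      congr 1
      apply if_congr _ rfl rfl
      constructor
      · rintro ⟨hl, h2, h3, h4⟩; exact ⟨by omega, h2, h3, h4⟩
      · rintro ⟨hl, h2, h3, h4⟩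
        refine ⟨?_, h2, h3, h4⟩
        rcases Nat.lt_succ_iff_lt_or_eq.mp hl with h | h
        · exact h
        · subst h; rw [h1] at h2; cases h2
    · rw [if_neg h1]
      by_cases h2 : pvAdj T V li n
      · rw [if_pos h2]
        by_cases hc : a = mask ||| 2 ^ n ∧ b = n
        · obtain ⟨ha, hbn⟩ := hc
          subst hbn
          rw [if_pos (show a = mask ||| 2 ^ b ∧ b = b from ⟨ha, rfl⟩), ih (mask ||| 2 ^ b) b]
          have hb1 : ¬ (b < b ∧ mask.testBit b = false ∧ mask ||| 2 ^ b = mask ||| 2 ^ b ∧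
              pvAdj T V li b = true) := by rintro ⟨h, _⟩; omega
          rw [if_neg hb1,
            if_pos (show b < b + 1 ∧ mask.testBit b = false ∧ a = mask ||| 2 ^ b ∧
              pvAdj T V li b = true from ⟨by omega, by simpa using h1, ha, h2⟩), ha, add_zero]
        · rw [if_neg hc, ih a b]
          congr 1
          apply if_congr _ rfl rfl
          constructor
          · rintro ⟨hl, h3, h4, h5⟩; exact ⟨by omega, h3, h4, h5⟩
          · rintro ⟨hl, h3, h4, h5⟩
            refine ⟨?_, h3, h4, h5⟩
            rcases Nat.lt_succ_iff_lt_or_eq.mp hl with h | h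
            · exact h
            · exact absurd ⟨by rw [h] at h4; exact h4, h⟩ hc
      · rw [if_neg h2, ih a b]
        congr 1
        apply if_congr _ rfl rfl
        constructor
        · rintro ⟨hl, h3, h4, h5⟩; exact ⟨by omega, h3, h4, h5⟩
        · rintro ⟨hl, h3, h4, h5⟩
          refine ⟨?_, h3, h4, h5⟩
          rcases Nat.lt_succ_iff_lt_or_eq.mp hl with h | h
          · exact h
          · subst h; exact absurd h5 (by simpa using h2)

lemma pv_mid_eq (T V : List Int) (m mask n : Nat) (dp : Nat → Nat → Int) :
    ∀ a b, ((List.range n).foldl (pvStepLi T V m mask) dp) a b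
      = dp a b + (if b < m ∧ mask.testBit b = false ∧ a = mask ||| 2 ^ b then
          ∑ li ∈ Finset.range n, (if pvAdj T V li b then dp mask li else 0) else 0) := by
  induction n with
  | zero => intro a b; simp
  | succ n ih =>
    intro a b
    rw [List.range_succ, List.foldl_append, List.foldl_cons, List.foldl_nil, pvStepLi_apply]
    have hrow : ∀ li', ((List.range n).foldl (pvStepLi T V m mask) dp) mask li' = dp mask li' := by
      intro li'
      rw [ih mask li', if_neg, add_zero]
      rintro ⟨_, hbf, heq⟩
      have hbt := pv_or_bit (w := mask) (li := li')
      rw [← heq] at hbt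
      rw [hbt] at hbf
      cases hbf
    by_cases h0 : ((List.range n).foldl (pvStepLi T V m mask) dp) mask n = 0
    · rw [if_pos h0, ih a b]
      have hdp0 : dp mask n = 0 := by rw [← hrow n]; exact h0
      congr 1
      by_cases hC : b < m ∧ mask.testBit b = false ∧ a = mask ||| 2 ^ b
      · rw [if_pos hC, if_pos hC, Finset.sum_range_succ, hdp0]
        simp
      · rw [if_neg hC, if_neg hC]
    · rw [if_neg h0,
        pv_inner_eq T V mask n _ m ((List.range n).foldl (pvStepLi T V m mask) dp) a b, ih a b,
        hrow n]
      by_cases hC : b < m ∧ mask.testBit b = false ∧ a = mask ||| 2 ^ b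
      · obtain ⟨hC1, hC2, hC3⟩ := hC
        by_cases hadj : pvAdj T V n b
        · rw [if_pos (show b < m ∧ mask.testBit b = false ∧ a = mask ||| 2 ^ b ∧
              pvAdj T V n b = true from ⟨hC1, hC2, hC3, hadj⟩),
            if_pos (show b < m ∧ mask.testBit b = false ∧ a = mask ||| 2 ^ b from ⟨hC1, hC2, hC3⟩),
            if_pos (show b < m ∧ mask.testBit b = false ∧ a = mask ||| 2 ^ b from ⟨hC1, hC2, hC3⟩),
            Finset.sum_range_succ, if_pos hadj]
          ring
        · rw [if_neg (show ¬ (b < m ∧ mask.testBit b = false ∧ a = mask ||| 2 ^ b ∧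
              pvAdj T V n b = true) from by rintro ⟨_, _, _, h⟩; exact hadj h),
            if_pos (show b < m ∧ mask.testBit b = false ∧ a = mask ||| 2 ^ b from ⟨hC1, hC2, hC3⟩),
            if_pos (show b < m ∧ mask.testBit b = false ∧ a = mask ||| 2 ^ b from ⟨hC1, hC2, hC3⟩),
            Finset.sum_range_succ, if_neg hadj]
          ring
      · rw [if_neg (show ¬ (b < m ∧ mask.testBit b = false ∧ a = mask ||| 2 ^ b ∧
            pvAdj T V n b = true) from by rintro ⟨hh1, hh2, hh3, _⟩; exact hC ⟨hh1, hh2, hh3⟩),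
          if_neg hC, if_neg hC]
        ring

lemma pv_init_eq (n : Nat) : ∀ a b,
    pvDpInit n a b = if a = 2 ^ b ∧ b < n then 1 else 0 := by
  unfold pvDpInit
  induction n with
  | zero => intro a b; simp
  | succ n ih =>
    intro a b
    rw [List.range_succ, List.foldl_append, List.foldl_cons, List.foldl_nil, pvUpd_apply]
    by_cases hb : a = 2 ^ n ∧ b = n
    · obtain ⟨h1, h2⟩ := hb
      subst h2
      rw [if_pos (show a = 2 ^ b ∧ b = b from ⟨h1, rfl⟩),
        if_pos (show a = 2 ^ b ∧ b < b + 1 from ⟨h1, by omega⟩)]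
    · rw [if_neg hb, ih a b]
      apply if_congr _ rfl rfl
      constructor
      · rintro ⟨h1, h2⟩; exact ⟨h1, by omega⟩
      · rintro ⟨h1, h2⟩
        refine ⟨h1, ?_⟩
        rcases Nat.lt_succ_iff_lt_or_eq.mp h2 with h | h
        · exact h
        · subst h; exact absurd ⟨h1, rfl⟩ hb

-- the invariant formula turns into P(a, b) as soon as a ^^^ 2^b has been processed
lemma pv_cases (T V : List Int) (m : Nat) {M a b : Nat} (hb : b < m)
    (hxor : a.testBit b = true → a ≠ 2 ^ b → a ^^^ 2 ^ b ≤ M) :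
    (if a = 2 ^ b ∧ b < m then (1 : Int) else 0)
      + (if b < m ∧ a.testBit b = true ∧ a ≠ 2 ^ b ∧ a ^^^ 2 ^ b ≤ M then
          ∑ li ∈ Finset.range m,
            (if pvAdj T V li b then pvP T V m (a ^^^ 2 ^ b) li else 0) else 0)
      = pvP T V m a b := by
  by_cases hbit : a.testBit b
  · by_cases ha : a = 2 ^ b
    · subst ha
      rw [if_pos ⟨rfl, hb⟩, if_neg (by rintro ⟨_, _, h, _⟩; exact h rfl), add_zero, pvP_pow]
    · rw [if_neg (by rintro ⟨h, _⟩; exact ha h),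
        if_pos ⟨hb, hbit, ha, hxor hbit ha⟩, zero_add, pvP_step hbit ha]
  · rw [if_neg (by rintro ⟨h, _⟩; rw [h, Nat.testBit_two_pow_self] at hbit; exact hbit rfl),
      if_neg (by rintro ⟨_, h, _⟩; exact hbit h), pvP_not_bit (by simpa using hbit)]
    simp

lemma pv_dpA_eq (T V : List Int) (m : Nat) :
    ∀ M a b, pvDpA T V m M a b
      = (if a = 2 ^ b ∧ b < m then 1 else 0)
        + (if b < m ∧ a.testBit b = true ∧ a ≠ 2 ^ b ∧ a ^^^ 2 ^ b ≤ M then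
            ∑ li ∈ Finset.range m,
              (if pvAdj T V li b then pvP T V m (a ^^^ 2 ^ b) li else 0) else 0) := by
  intro M
  induction M with
  | zero =>
    intro a b
    unfold pvDpA
    rw [List.range_zero, List.foldl_nil, pv_init_eq]
    have hnot : ¬ (b < m ∧ a.testBit b = true ∧ a ≠ 2 ^ b ∧ a ^^^ 2 ^ b ≤ 0) := by
      rintro ⟨_, _, hne, hle⟩
      exact pv_xor_ne_zero hne (by omega)
    rw [if_neg hnot, add_zero]
  | succ M ih =>
    intro a b
    have hstep : pvDpA T V m (M + 1)
        = (List.range m).foldl (pvStepLi T V m (M + 1)) (pvDpA T V m M) := by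
      unfold pvDpA
      rw [List.range_succ, List.foldl_append, List.foldl_cons, List.foldl_nil]
    rw [hstep, pv_mid_eq T V m (M + 1) m (pvDpA T V m M) a b]
    have hrowP : ∀ li, li < m → pvDpA T V m M (M + 1) li = pvP T V m (M + 1) li := by
      intro li hli
      rw [ih (M + 1) li]
      exact pv_cases T V m hli (fun hbit _ => by have := pv_xor_lt hbit; omega)
    have hsum : (∑ li ∈ Finset.range m,
          (if pvAdj T V li b then pvDpA T V m M (M + 1) li else 0))
        = ∑ li ∈ Finset.range m, (if pvAdj T V li b then pvP T V m (M + 1) li else 0) := by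
      apply Finset.sum_congr rfl
      intro li hli
      rw [hrowP li (Finset.mem_range.mp hli)]
    rw [hsum, ih a b]
    by_cases hδ : b < m ∧ (M + 1).testBit b = false ∧ a = (M + 1) ||| 2 ^ b
    · obtain ⟨hbm, hbitM, ha⟩ := hδ
      have hx : a ^^^ 2 ^ b = M + 1 := by rw [ha, pv_or_xor hbitM]
      have habit : a.testBit b = true := by rw [ha]; exact pv_or_bit
      have hane : a ≠ 2 ^ b := by
        intro hh
        rw [hh, Nat.xor_self] at hx
        omega
      rw [hx,
        if_neg (show ¬ (a = 2 ^ b ∧ b < m) from fun hh => hane hh.1),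
        if_neg (show ¬ (b < m ∧ a.testBit b = true ∧ a ≠ 2 ^ b ∧ M + 1 ≤ M) from by
          rintro ⟨_, _, _, hle⟩; omega),
        if_pos (show b < m ∧ (M + 1).testBit b = false ∧ a = (M + 1) ||| 2 ^ b from
          ⟨hbm, hbitM, ha⟩),
        if_pos (show b < m ∧ a.testBit b = true ∧ a ≠ 2 ^ b ∧ M + 1 ≤ M + 1 from
          ⟨hbm, habit, hane, le_refl _⟩)]
      ring
    · rw [if_neg hδ, add_zero]
      congr 1
      apply if_congr _ rfl rfl
      constructor
      · rintro ⟨h1, h2, h3, h4⟩; exact ⟨h1, h2, h3, by omega⟩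
      · rintro ⟨h1, h2, h3, h4⟩
        refine ⟨h1, h2, h3, ?_⟩
        by_cases hle : a ^^^ 2 ^ b ≤ M
        · exact hle
        · exfalso
          have hxe : a ^^^ 2 ^ b = M + 1 := by omega
          apply hδ
          refine ⟨h1, ?_, ?_⟩
          · rw [← hxe, pv_xor_bit, h2]
            rfl
          · rw [← hxe, pv_xor_or h2]

lemma pv_dpA_P (T V : List Int) (m M a b : Nat) (hb : b < m) (ha : a ≤ M + 1) :
    pvDpA T V m M a b = pvP T V m a b := by
  rw [pv_dpA_eq T V m M a b]
  exact pv_cases T V m hb (fun hbit _ => by have := pv_xor_lt hbit; omega)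

lemma pv_foldl_sum (f : Nat → Int) (n : Nat) (s : Int) :
    (List.range n).foldl (fun acc i => acc + f i) s = s + ∑ i ∈ Finset.range n, f i := by
  rw [PySem.List.foldl_add]
  congr 1

-- ---- simulating the row-major array table by the functional table ----
lemma pv_getD {α : Type} (a : Array α) (i : Nat) (d : α) : a.getD i d = (a[i]?).getD d := by
  unfold Array.getD
  split
  · next h => rw [Array.getElem?_eq_getElem h]; rfl
  · next h => rw [Array.getElem?_eq_none (by omega)]; rfl

lemma pv_key_lt {K M a0 b0 : Nat} (ha0 : a0 < K) (hb0 : b0 < M) : a0 * M + b0 < K * M :=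
  calc a0 * M + b0 < a0 * M + M := by omega
  _ = (a0 + 1) * M := by ring
  _ ≤ K * M := Nat.mul_le_mul_right M ha0

lemma pv_key_inj {M a b a' b' : Nat} (hb : b < M) (hb' : b' < M)
    (h : a * M + b = a' * M + b') : a = a' ∧ b = b' := by
  have hM : 0 < M := by omega
  have h1 : (a * M + b) / M = a := by
    rw [Nat.mul_comm a M, Nat.mul_add_div hM, Nat.div_eq_of_lt hb]
    rfl
  have h2 : (a' * M + b') / M = a' := by
    rw [Nat.mul_comm a' M, Nat.mul_add_div hM, Nat.div_eq_of_lt hb']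
    rfl

  have h3 : (a * M + b) % M = b := by
    rw [Nat.mul_comm a M, Nat.mul_add_mod, Nat.mod_eq_of_lt hb]
  have h4 : (a' * M + b') % M = b' := by
    rw [Nat.mul_comm a' M, Nat.mul_add_mod, Nat.mod_eq_of_lt hb']
  constructor
  · rw [← h1, ← h2, h]
  · rw [← h3, ← h4, h]

def pvRel (m : Nat) (dp : Array Int) (fdp : Nat → Nat → Int) : Prop :=
  dp.size = 2 ^ m * m ∧ ∀ a b, b < m → dp.getD (a * m + b) 0 = fdp a b

lemma pv_rel_set {m : Nat} {dp : Array Int} {fdp : Nat → Nat → Int} {a0 b0 : Nat}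
    (h : pvRel m dp fdp) (ha0 : a0 < 2 ^ m) (hb0 : b0 < m) (v : Int) :
    pvRel m (dp.setIfInBounds (a0 * m + b0) v) (pvUpd fdp a0 b0 v) := by
  constructor
  · rw [Array.size_setIfInBounds]; exact h.1
  · intro a b hb
    rw [pv_getD, Array.getElem?_setIfInBounds]
    unfold pvUpd
    by_cases hk : a0 * m + b0 = a * m + b
    · obtain ⟨h1, h2⟩ := pv_key_inj hb0 hb hk
      rw [if_pos hk, if_pos (by rw [h.1]; exact pv_key_lt ha0 hb0),
        if_pos (show a = a0 ∧ b = b0 from ⟨h1.symm, h2.symm⟩)]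
      rfl
    · rw [if_neg hk, if_neg (show ¬ (a = a0 ∧ b = b0) from by rintro ⟨rfl, rfl⟩; exact hk rfl),
        ← pv_getD]
      exact h.2 a b hb

lemma pv_rel_foldl {m : Nat} (l : List Nat) (g : Array Int → Nat → Array Int)
    (f : (Nat → Nat → Int) → Nat → (Nat → Nat → Int)) (P : Nat → Prop)
    (hstep : ∀ dp fdp x, P x → pvRel m dp fdp → pvRel m (g dp x) (f fdp x)) :
    (∀ x ∈ l, P x) → ∀ dp fdp, pvRel m dp fdp → pvRel m (l.foldl g dp) (l.foldl f fdp) := by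
  induction l with
  | nil => intro _ dp fdp h; exact h
  | cons x xs ih =>
    intro hl dp fdp h
    exact ih (fun y hy => hl y (List.mem_cons_of_mem _ hy))
      (g dp x) (f fdp x) (hstep dp fdp x (hl x List.mem_cons_self) h)

lemma pv_sim_inner (T V : List Int) (m mask li : Nat) (c : Int) (hmask : mask < 2 ^ m) :
    ∀ dp fdp, pvRel m dp fdp →
      pvRel m ((List.range m).foldl (pvAInner T V m mask li c) dp)
        ((List.range m).foldl (pvStepNi T V mask li c) fdp) := by
  intro dp fdp h
  refine pv_rel_foldl _ _ _ (fun ni => ni < m) ?_ (fun x hx => List.mem_range.mp hx) dp fdp h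
  intro dp fdp ni hni hrel
  unfold pvAInner pvStepNi
  by_cases h1 : mask.testBit ni
  · rw [if_pos h1, if_pos h1]; exact hrel
  · rw [if_neg h1, if_neg h1]
    by_cases h2 : pvAdj T V li ni
    · rw [if_pos h2, if_pos h2]
      have htgt : mask ||| 2 ^ ni < 2 ^ m :=
        Nat.or_lt_two_pow hmask (Nat.pow_lt_pow_right (by norm_num) hni)
      rw [hrel.2 (mask ||| 2 ^ ni) ni hni]
      exact pv_rel_set hrel htgt hni _
    · rw [if_neg h2, if_neg h2]; exact hrel

lemma pv_sim_mid (T V : List Int) (m mask : Nat) (hmask : mask < 2 ^ m) :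
    ∀ dp fdp li, li < m → pvRel m dp fdp →
      pvRel m (pvAMid T V m mask dp li) (pvStepLi T V m mask fdp li) := by
  intro dp fdp li hli hrel
  unfold pvAMid pvStepLi
  simp only
  rw [hrel.2 mask li hli]
  by_cases hc : fdp mask li = 0
  · rw [if_pos hc, if_pos hc]; exact hrel
  · rw [if_neg hc, if_neg hc]
    exact pv_sim_inner T V m mask li _ hmask dp fdp hrel

lemma pv_sim_dpA (T V : List Int) (m M : Nat) (hM : M ≤ 2 ^ m - 1) :
    pvRel m (pvADp T V m M) (pvDpA T V m M) := by
  have h2m : 0 < 2 ^ m := Nat.two_pow_pos m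
  have hbase : pvRel m (Array.replicate (2 ^ m * m) (0 : Int)) (fun _ _ => (0 : Int)) := by
    constructor
    · exact Array.size_replicate
    · intro a b _
      rw [pv_getD, Array.getElem?_replicate]
      by_cases hk : a * m + b < 2 ^ m * m <;> simp [hk]
  have hinit : pvRel m
      ((List.range m).foldl (fun dp vi => dp.setIfInBounds (2 ^ vi * m + vi) 1)
        (Array.replicate (2 ^ m * m) 0))
      ((List.range m).foldl (fun fdp vi => pvUpd fdp (2 ^ vi) vi 1) (fun _ _ => 0)) := by
    refine pv_rel_foldl _ _ _ (fun vi => vi < m) ?_ (fun x hx => List.mem_range.mp hx)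
      _ _ hbase
    intro dp fdp vi hvi hrel
    exact pv_rel_set hrel (Nat.pow_lt_pow_right (by norm_num) hvi) hvi 1
  unfold pvADp pvDpA pvDpInit
  refine pv_rel_foldl _ _ _ (fun i => i + 1 < 2 ^ m) ?_
    (fun x hx => by have := List.mem_range.mp hx; omega) _ _ hinit
  intro dp fdp i hi hrel
  refine pv_rel_foldl _ _ _ (fun li => li < m) ?_ (fun x hx => List.mem_range.mp hx)
    _ _ hrel
  intro dp fdp li hli hrel
  exact pv_sim_mid T V m (i + 1) hi dp fdp li hli hrel

lemma pv_hamA (T V : List Int) (hm : ¬ V.length ≤ 1) :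
    ham_sub T V = ∑ li ∈ Finset.range V.length,
      pvP T V V.length (2 ^ V.length - 1) li := by
  rw [pv_ham_unfold T V hm,
    pv_foldl_sum (fun li => (pvADp T V V.length (2 ^ V.length - 1)).getD
      ((2 ^ V.length - 1) * V.length + li) 0) V.length 0, zero_add]
  apply Finset.sum_congr rfl
  intro li hli
  have hrel := pv_sim_dpA T V V.length (2 ^ V.length - 1) (le_refl _)
  rw [hrel.2 (2 ^ V.length - 1) li (Finset.mem_range.mp hli)]
  exact pv_dpA_P T V V.length _ _ li (Finset.mem_range.mp hli) (by omega)

-- ---- B-side characterisation ----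
lemma pv_dfs_full (T V : List Int) (m full f cur : Nat) :
    pvDfs T V m full f full cur = 1 := by
  cases f <;> simp [pvDfs]

lemma pv_dfs_succ (T V : List Int) (m full f w cur : Nat) (h : w ≠ full) :
    pvDfs T V m full (f + 1) w cur
      = ∑ ni ∈ Finset.range m,
          (if w.testBit ni = false ∧ pvAdj T V cur ni = true then
            pvDfs T V m full f (w ||| 2 ^ ni) ni else 0) := by
  have hfun : (fun (total : Int) ni => if (!w.testBit ni) && pvAdj T V cur ni then
        total + pvDfs T V m full f (w ||| 2 ^ ni) ni else total)
      = fun total ni => total + (if w.testBit ni = false ∧ pvAdj T V cur ni = true then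
          pvDfs T V m full f (w ||| 2 ^ ni) ni else 0) := by
    funext t ni
    rcases hb : w.testBit ni <;> rcases hadj : pvAdj T V cur ni <;> simp [hb, hadj]
  simp only [pvDfs]
  rw [if_neg h, hfun, pv_foldl_sum, zero_add]

-- ---- popcount restricted to the low m bits ----
def pvPc (m mask : Nat) : Nat := ((Finset.range m).filter (fun i => mask.testBit i)).card

lemma pvPc_full (m : Nat) : pvPc m (2 ^ m - 1) = m := by
  unfold pvPc
  rw [Finset.filter_true_of_mem, Finset.card_range]
  intro i hi
  simp [Nat.testBit_two_pow_sub_one, Finset.mem_range.mp hi]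

lemma pvPc_eq_full {m mask : Nat} (h : mask < 2 ^ m) (hc : pvPc m mask = m) :
    mask = 2 ^ m - 1 := by
  unfold pvPc at hc
  have heq : (Finset.range m).filter (fun i => mask.testBit i) = Finset.range m :=
    Finset.eq_of_subset_of_card_le (Finset.filter_subset _ _)
      (by rw [Finset.card_range]; omega)
  have hbits : ∀ i, i < m → mask.testBit i = true := by
    intro i hi
    have hmem : i ∈ (Finset.range m).filter (fun i => mask.testBit i) := by
      rw [heq]; exact Finset.mem_range.mpr hi
    simpa using (Finset.mem_filter.mp hmem).2
  apply Nat.eq_of_testBit_eq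
  intro i
  by_cases hi : i < m
  · simp [Nat.testBit_two_pow_sub_one, hi, hbits i hi]
  · have h1 : mask.testBit i = false :=
      Nat.testBit_lt_two_pow (lt_of_lt_of_le h (Nat.pow_le_pow_right (by norm_num) (by omega)))
    simp [Nat.testBit_two_pow_sub_one, hi, h1]

lemma pvPc_pow {m vi : Nat} (h : vi < m) : pvPc m (2 ^ vi) = 1 := by
  unfold pvPc
  have hset : (Finset.range m).filter (fun i => (2 ^ vi).testBit i) = {vi} := by
    ext i
    simp only [Finset.mem_filter, Finset.mem_range, Finset.mem_singleton, Nat.testBit_two_pow,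
      decide_eq_true_eq]
    constructor
    · rintro ⟨_, h2⟩; exact h2.symm
    · rintro rfl; exact ⟨h, rfl⟩
  rw [hset, Finset.card_singleton]

lemma pvPc_eq_one {m mask : Nat} (h : mask < 2 ^ m) (hc : pvPc m mask = 1) :
    ∃ vi, vi < m ∧ mask = 2 ^ vi := by
  unfold pvPc at hc
  obtain ⟨a, ha⟩ := Finset.card_eq_one.mp hc
  have hmem : a ∈ (Finset.range m).filter (fun i => mask.testBit i) := by
    rw [ha]; exact Finset.mem_singleton_self a
  rw [Finset.mem_filter, Finset.mem_range] at hmem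
  refine ⟨a, hmem.1, ?_⟩
  apply Nat.eq_of_testBit_eq
  intro i
  rw [Nat.testBit_two_pow]
  by_cases hi : i < m
  · by_cases hia : i = a
    · subst hia; simp [hmem.2]
    · have hnot : i ∉ ({a} : Finset Nat) := by simpa using hia
      rw [← ha] at hnot
      have hbf : mask.testBit i = false := by
        cases hbb : mask.testBit i
        · rfl
        · exact absurd (Finset.mem_filter.mpr ⟨Finset.mem_range.mpr hi, hbb⟩) hnot
      rw [hbf]
      simp [Ne.symm hia]
  · have h1 : mask.testBit i = false :=
      Nat.testBit_lt_two_pow (lt_of_lt_of_le h (Nat.pow_le_pow_right (by norm_num) (by omega)))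
    have h2 : a ≠ i := by omega
    simp [h1, h2]

lemma pvPc_xor {m mask li : Nat} (hli : li < m) (h : mask.testBit li = true) :
    pvPc m (mask ^^^ 2 ^ li) + 1 = pvPc m mask := by
  have hset : (Finset.range m).filter (fun i => (mask ^^^ 2 ^ li).testBit i)
      = ((Finset.range m).filter (fun i => mask.testBit i)).erase li := by
    ext i
    by_cases hi : i = li
    · subst hi
      simp [Finset.mem_filter, Finset.mem_erase, pv_xor_bit, h]
    · simp only [Finset.mem_filter, Finset.mem_erase, Finset.mem_range, Nat.testBit_xor,
        Nat.testBit_two_pow, decide_eq_true_eq]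
      constructor
      · rintro ⟨h1, h2⟩
        refine ⟨hi, h1, ?_⟩
        simpa [Ne.symm hi] using h2
      · rintro ⟨_, h1, h2⟩
        exact ⟨h1, by simp [Ne.symm hi, h2]⟩
  unfold pvPc
  rw [hset, Finset.card_erase_of_mem (Finset.mem_filter.mpr ⟨Finset.mem_range.mpr hli, h⟩)]
  have hpos : 0 < ((Finset.range m).filter (fun i => mask.testBit i)).card :=
    Finset.card_pos.mpr ⟨li, Finset.mem_filter.mpr ⟨Finset.mem_range.mpr hli, h⟩⟩
  omega

lemma pvPc_or {m w li : Nat} (hli : li < m) (h : w.testBit li = false) :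
    pvPc m (w ||| 2 ^ li) = pvPc m w + 1 := by
  have hset : (Finset.range m).filter (fun i => (w ||| 2 ^ li).testBit i)
      = insert li ((Finset.range m).filter (fun i => w.testBit i)) := by
    ext i
    by_cases hi : i = li
    · subst hi
      simp [Finset.mem_filter, Finset.mem_insert, pv_or_bit, hli]
    · simp only [Finset.mem_filter, Finset.mem_insert, Finset.mem_range, Nat.testBit_or,
        Nat.testBit_two_pow, decide_eq_true_eq]
      constructor
      · rintro ⟨h1, h2⟩
        refine Or.inr ⟨h1, ?_⟩
        simpa [Ne.symm hi] using h2
      · rintro (h1 | ⟨h1, h2⟩)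
        · exact absurd h1 hi
        · exact ⟨h1, by simp [Ne.symm hi, h2]⟩
  unfold pvPc
  rw [hset, Finset.card_insert_of_notMem (by simp [Finset.mem_filter, h])]

-- ---- the threaded cache of pvDfsM only ever stores pure pvDfs values ----
def pvCGood (T V : List Int) (m : Nat) (cache : Array (Option Int)) : Prop :=
  ∀ cur vis v, vis < 2 ^ m → cache.getD (cur * 2 ^ m + vis) none = some v →
    v = pvDfs T V m (2 ^ m - 1) (m - pvPc m vis) vis cur

lemma pv_pc_le (m vis : Nat) : pvPc m vis ≤ m := by
  have := Finset.card_filter_le (Finset.range m) (fun i => vis.testBit i = true)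
  unfold pvPc
  simpa using this

lemma pv_cgood_empty (T V : List Int) (m n : Nat) :
    pvCGood T V m (Array.replicate n none) := by
  intro cur vis v _ hget
  rw [pv_getD, Array.getElem?_replicate] at hget
  by_cases hk : cur * 2 ^ m + vis < n <;> simp [hk] at hget

lemma pv_cgood_set {T V : List Int} {m : Nat} {cache : Array (Option Int)} {cur vis : Nat}
    {v : Int} (h : pvCGood T V m cache) (hvis : vis < 2 ^ m)
    (hv : v = pvDfs T V m (2 ^ m - 1) (m - pvPc m vis) vis cur) :
    pvCGood T V m (cache.setIfInBounds (cur * 2 ^ m + vis) (some v)) := by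
  intro cur' vis' v' h1 hget'
  rw [pv_getD, Array.getElem?_setIfInBounds] at hget'
  by_cases hk : cur * 2 ^ m + vis = cur' * 2 ^ m + vis'
  · obtain ⟨hc, hv2⟩ := pv_key_inj hvis h1 hk
    rw [if_pos hk] at hget'
    by_cases hsz : cur * 2 ^ m + vis < cache.size
    · rw [if_pos hsz] at hget'
      simp only [Option.getD_some, Option.some.injEq] at hget'
      rw [← hget', hv, hc, hv2]
    · rw [if_neg hsz] at hget'
      simp at hget'
  · rw [if_neg hk, ← pv_getD] at hget'
    exact h cur' vis' v' h1 hget'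

lemma pv_dfsM_correct (T V : List Int) (m : Nat) :
    ∀ fuel vis cur cache, pvCGood T V m cache → vis < 2 ^ m →
      fuel = m - pvPc m vis →
      (pvDfsM T V m (2 ^ m - 1) fuel vis cur cache).1
          = pvDfs T V m (2 ^ m - 1) fuel vis cur ∧
        pvCGood T V m (pvDfsM T V m (2 ^ m - 1) fuel vis cur cache).2 := by
  intro fuel
  induction fuel with
  | zero =>
    intro vis cur cache hg hvis hfuel
    rw [pvDfsM]
    cases hget : cache.getD (cur * 2 ^ m + vis) none with
    | some v =>
      simp only
      refine ⟨?_, hg⟩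
      rw [hg cur vis v hvis hget, ← hfuel]
    | none =>
      by_cases hvf : vis = 2 ^ m - 1
      · simp only [if_pos hvf]
        refine ⟨by rw [hvf, pv_dfs_full], ?_⟩
        exact pv_cgood_set hg hvis (by rw [hvf, pv_dfs_full])
      · exfalso
        have hle := pv_pc_le m vis
        have hne : pvPc m vis ≠ m := fun hh => hvf (pvPc_eq_full hvis hh)
        omega
  | succ f ihf =>
    intro vis cur cache hg hvis hfuel
    rw [pvDfsM]
    cases hget : cache.getD (cur * 2 ^ m + vis) none with
    | some v =>
      simp only
      refine ⟨?_, hg⟩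
      rw [hg cur vis v hvis hget, ← hfuel]
    | none =>
      by_cases hvf : vis = 2 ^ m - 1
      · simp only [if_pos hvf]
        refine ⟨by rw [hvf, pv_dfs_full], ?_⟩
        exact pv_cgood_set hg hvis (by rw [hvf, pv_dfs_full])
      · have hpc : pvPc m vis < m := by
          have hle := pv_pc_le m vis
          have hne : pvPc m vis ≠ m := fun hh => hvf (pvPc_eq_full hvis hh)
          omega
        simp only [if_neg hvf]
        have hlist : ∀ (l : List Nat), (∀ x ∈ l, x < m) →
            ∀ (tc : Int × Array (Option Int)) (t : Int), pvCGood T V m tc.2 → tc.1 = t →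
            (l.foldl (fun tc ni =>
                if (!vis.testBit ni) && pvAdj T V cur ni then
                  let vc := pvDfsM T V m (2 ^ m - 1) f (vis ||| 2 ^ ni) ni tc.2
                  (tc.1 + vc.1, vc.2)
                else tc) tc).1
              = l.foldl (fun total ni =>
                  if (!vis.testBit ni) && pvAdj T V cur ni then
                    total + pvDfs T V m (2 ^ m - 1) f (vis ||| 2 ^ ni) ni
                  else total) t ∧
              pvCGood T V m (l.foldl (fun tc ni =>
                if (!vis.testBit ni) && pvAdj T V cur ni then
                  let vc := pvDfsM T V m (2 ^ m - 1) f (vis ||| 2 ^ ni) ni tc.2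
                  (tc.1 + vc.1, vc.2)
                else tc) tc).2 := by
          intro l
          induction l with
          | nil => intro _ tc t hgood ht; exact ⟨ht, hgood⟩
          | cons x xs ihl =>
            intro hl tc t hgood ht
            rw [List.foldl_cons, List.foldl_cons]
            by_cases hcnd : ((!vis.testBit x) && pvAdj T V cur x) = true
            · rw [if_pos hcnd, if_pos hcnd]
              have hx : x < m := hl x List.mem_cons_self
              have hbitx : vis.testBit x = false := by
                have := (Bool.and_eq_true _ _).mp hcnd
                simpa using this.1
              have hvis' : vis ||| 2 ^ x < 2 ^ m :=
                Nat.or_lt_two_pow hvis (Nat.pow_lt_pow_right (by norm_num) hx)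
              have hpc' : pvPc m (vis ||| 2 ^ x) = pvPc m vis + 1 := pvPc_or hx hbitx
              have hrec := ihf (vis ||| 2 ^ x) x tc.2 hgood hvis' (by omega)
              simp only
              exact ihl (fun y hy => hl y (List.mem_cons_of_mem _ hy)) _ _
                hrec.2 (by rw [hrec.1, ht])
            · rw [if_neg hcnd, if_neg hcnd]
              exact ihl (fun y hy => hl y (List.mem_cons_of_mem _ hy)) tc t hgood ht
        have hmain := hlist (List.range m) (fun x hx => List.mem_range.mp hx)
          ((0 : Int), cache) 0 hg rfl
        constructor
        · rw [hmain.1, pvDfs, if_neg hvf]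
        · apply pv_cgood_set hmain.2 hvis
          rw [hmain.1, ← hfuel, pvDfs, if_neg hvf]

lemma pv_hamB (T V : List Int) (hm : ¬ V.length ≤ 1) :
    ham_sub_alt T V = ∑ vi ∈ Finset.range V.length,
      pvDfs T V V.length (2 ^ V.length - 1) (V.length - 1) (2 ^ vi) vi := by
  unfold ham_sub_alt
  rw [if_neg hm]
  have hlist : ∀ (l : List Nat), (∀ x ∈ l, x < V.length) →
      ∀ (sc : Int × Array (Option Int)) (t : Int), pvCGood T V V.length sc.2 → sc.1 = t →
      (l.foldl (fun sc vi =>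
          let vc := pvDfsM T V V.length (2 ^ V.length - 1) (V.length - 1) (2 ^ vi) vi sc.2
          (sc.1 + vc.1, vc.2)) sc).1
        = l.foldl (fun s vi =>
            s + pvDfs T V V.length (2 ^ V.length - 1) (V.length - 1) (2 ^ vi) vi) t := by
    intro l
    induction l with
    | nil => intro _ sc t _ ht; exact ht
    | cons x xs ihl =>
      intro hl sc t hgood ht
      rw [List.foldl_cons, List.foldl_cons]
      have hx : x < V.length := hl x List.mem_cons_self
      have hvis : 2 ^ x < 2 ^ V.length := Nat.pow_lt_pow_right (by norm_num) hx
      have hrec := pv_dfsM_correct T V V.length (V.length - 1) (2 ^ x) x sc.2 hgood hvis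
        (by rw [pvPc_pow hx])
      simp only
      exact ihl (fun y hy => hl y (List.mem_cons_of_mem _ hy)) _ _
        hrec.2 (by rw [hrec.1, ht])
  rw [hlist (List.range V.length) (fun x hx => List.mem_range.mp hx)
    ((0 : Int), Array.replicate (V.length * 2 ^ V.length) none) 0
    (pv_cgood_empty T V V.length _) rfl]
  rw [pv_foldl_sum (fun vi =>
    pvDfs T V V.length (2 ^ V.length - 1) (V.length - 1) (2 ^ vi) vi) V.length 0, zero_add]

-- ---- the exchange invariant: S k = Σ_{|mask| = k} Σ_li P(mask, li) · DFS(mask, li) ----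
def pvG (T V : List Int) (m k w li : Nat) : Int :=
  (∑ pj ∈ Finset.range m, (if pvAdj T V pj li then pvP T V m w pj else 0))
    * pvDfs T V m (2 ^ m - 1) (m - (k + 1)) (w ||| 2 ^ li) li

def pvS (T V : List Int) (m k : Nat) : Int :=
  ∑ mask ∈ (Finset.range (2 ^ m)).filter (fun mask => pvPc m mask = k),
    ∑ li ∈ Finset.range m,
      pvP T V m mask li * pvDfs T V m (2 ^ m - 1) (m - k) mask li

lemma pvS_step (T V : List Int) (m k : Nat) (hk1 : 1 ≤ k) (hk2 : k < m) :
    pvS T V m (k + 1) = pvS T V m k := by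
  have hL : pvS T V m (k + 1)
      = ∑ mask ∈ (Finset.range (2 ^ m)).filter (fun mask => pvPc m mask = k + 1),
          ∑ li ∈ Finset.range m,
            (if mask.testBit li = true then pvG T V m k (mask ^^^ 2 ^ li) li else 0) := by
    unfold pvS
    apply Finset.sum_congr rfl
    intro mask hmask
    rw [Finset.mem_filter, Finset.mem_range] at hmask
    apply Finset.sum_congr rfl
    intro li hli
    rw [Finset.mem_range] at hli
    by_cases hbit : mask.testBit li
    · have hne : mask ≠ 2 ^ li := by
        intro hh
        have := hmask.2
        rw [hh, pvPc_pow hli] at this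
        omega
      rw [if_pos hbit, pvP_step hbit hne]
      unfold pvG
      rw [pv_xor_or hbit]
    · rw [if_neg (by simp [hbit]), pvP_not_bit (by simpa using hbit), zero_mul]
  have hR : pvS T V m k
      = ∑ w ∈ (Finset.range (2 ^ m)).filter (fun w => pvPc m w = k),
          ∑ li ∈ Finset.range m,
            (if w.testBit li = false then pvG T V m k w li else 0) := by
    unfold pvS
    apply Finset.sum_congr rfl
    intro w hw
    rw [Finset.mem_filter, Finset.mem_range] at hw
    have hwne : w ≠ 2 ^ m - 1 := by
      intro hh
      have := hw.2
      rw [hh, pvPc_full] at this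
      omega
    have hmk : m - k = (m - (k + 1)) + 1 := by omega
    calc (∑ li ∈ Finset.range m,
            pvP T V m w li * pvDfs T V m (2 ^ m - 1) (m - k) w li)
        = ∑ pj ∈ Finset.range m, ∑ ni ∈ Finset.range m,
            pvP T V m w pj * (if w.testBit ni = false ∧ pvAdj T V pj ni = true then
              pvDfs T V m (2 ^ m - 1) (m - (k + 1)) (w ||| 2 ^ ni) ni else 0) := by
          apply Finset.sum_congr rfl
          intro pj _
          rw [hmk, pv_dfs_succ T V m (2 ^ m - 1) (m - (k + 1)) w pj hwne, Finset.mul_sum]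
      _ = ∑ ni ∈ Finset.range m, ∑ pj ∈ Finset.range m,
            pvP T V m w pj * (if w.testBit ni = false ∧ pvAdj T V pj ni = true then
              pvDfs T V m (2 ^ m - 1) (m - (k + 1)) (w ||| 2 ^ ni) ni else 0) :=
          Finset.sum_comm
      _ = ∑ li ∈ Finset.range m, (if w.testBit li = false then pvG T V m k w li else 0) := by
          apply Finset.sum_congr rfl
          intro ni _
          by_cases hb : w.testBit ni = true
          · rw [if_neg (show ¬ w.testBit ni = false from by rw [hb]; simp)]
            apply Finset.sum_eq_zero
            intro pj _
            rw [if_neg (show ¬ (w.testBit ni = false ∧ pvAdj T V pj ni = true) from by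
              rintro ⟨hh, _⟩; rw [hb] at hh; cases hh), mul_zero]
          · have hbf : w.testBit ni = false := by simpa using hb
            rw [if_pos hbf]
            unfold pvG
            rw [Finset.sum_mul]
            apply Finset.sum_congr rfl
            intro pj _
            by_cases hadj : pvAdj T V pj ni
            · rw [if_pos (show w.testBit ni = false ∧ pvAdj T V pj ni = true from ⟨hbf, hadj⟩),
                if_pos hadj]
            · rw [if_neg (show ¬ (w.testBit ni = false ∧ pvAdj T V pj ni = true) from by
                rintro ⟨_, hh⟩; exact hadj hh), if_neg hadj, mul_zero, zero_mul]
  rw [hL, hR]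
  have hLp : (∑ mask ∈ (Finset.range (2 ^ m)).filter (fun mask => pvPc m mask = k + 1),
        ∑ li ∈ Finset.range m,
          (if mask.testBit li = true then pvG T V m k (mask ^^^ 2 ^ li) li else 0))
      = ∑ p ∈ (((Finset.range (2 ^ m)).filter (fun mask => pvPc m mask = k + 1)) ×ˢ
          Finset.range m).filter (fun p => p.1.testBit p.2 = true),
          pvG T V m k (p.1 ^^^ 2 ^ p.2) p.2 := by
    conv_rhs => rw [Finset.sum_filter, Finset.sum_product]
  have hRp : (∑ w ∈ (Finset.range (2 ^ m)).filter (fun w => pvPc m w = k),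
        ∑ li ∈ Finset.range m, (if w.testBit li = false then pvG T V m k w li else 0))
      = ∑ q ∈ (((Finset.range (2 ^ m)).filter (fun w => pvPc m w = k)) ×ˢ
          Finset.range m).filter (fun q => q.1.testBit q.2 = false),
          pvG T V m k q.1 q.2 := by
    conv_rhs => rw [Finset.sum_filter, Finset.sum_product]
  rw [hLp, hRp]
  apply Finset.sum_nbij' (i := fun p => (p.1 ^^^ 2 ^ p.2, p.2))
    (j := fun q => (q.1 ||| 2 ^ q.2, q.2))
  · rintro ⟨mask, li⟩ hp
    simp only [Finset.mem_filter, Finset.mem_product, Finset.mem_range] at hp ⊢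
    obtain ⟨⟨⟨hm1, hm2⟩, hli⟩, hbit⟩ := hp
    refine ⟨⟨⟨Nat.xor_lt_two_pow hm1 (Nat.pow_lt_pow_right (by norm_num) hli), ?_⟩, hli⟩, ?_⟩
    · have := pvPc_xor hli hbit
      omega
    · rw [pv_xor_bit, hbit]
      rfl
  · rintro ⟨w, li⟩ hq
    simp only [Finset.mem_filter, Finset.mem_product, Finset.mem_range] at hq ⊢
    obtain ⟨⟨⟨hw1, hw2⟩, hli⟩, hbit⟩ := hq
    refine ⟨⟨⟨Nat.or_lt_two_pow hw1 (Nat.pow_lt_pow_right (by norm_num) hli), ?_⟩, hli⟩,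
      pv_or_bit⟩
    rw [pvPc_or hli hbit, hw2]
  · rintro ⟨mask, li⟩ hp
    simp only [Finset.mem_filter, Finset.mem_product, Finset.mem_range] at hp
    obtain ⟨_, hbit⟩ := hp
    simp [pv_xor_or hbit]
  · rintro ⟨w, li⟩ hq
    simp only [Finset.mem_filter, Finset.mem_product, Finset.mem_range] at hq
    obtain ⟨_, hbit⟩ := hq
    simp [pv_or_xor hbit]
  · rintro ⟨mask, li⟩ _
    rfl

lemma pvS_top (T V : List Int) (m : Nat) :
    pvS T V m m = ∑ li ∈ Finset.range m, pvP T V m (2 ^ m - 1) li := by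
  unfold pvS
  have hfil : (Finset.range (2 ^ m)).filter (fun mask => pvPc m mask = m) = {2 ^ m - 1} := by
    ext mask
    simp only [Finset.mem_filter, Finset.mem_range, Finset.mem_singleton]
    constructor
    · rintro ⟨h1, h2⟩; exact pvPc_eq_full h1 h2
    · rintro rfl
      have := Nat.two_pow_pos m
      exact ⟨by omega, pvPc_full m⟩
  rw [hfil, Finset.sum_singleton]
  apply Finset.sum_congr rfl
  intro li _
  rw [pv_dfs_full, mul_one]

lemma pvS_bot (T V : List Int) (m : Nat) :
    pvS T V m 1 = ∑ vi ∈ Finset.range m,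
      pvDfs T V m (2 ^ m - 1) (m - 1) (2 ^ vi) vi := by
  unfold pvS
  have hfil : (Finset.range (2 ^ m)).filter (fun mask => pvPc m mask = 1)
      = (Finset.range m).image (fun vi => 2 ^ vi) := by
    ext mask
    simp only [Finset.mem_filter, Finset.mem_range, Finset.mem_image]
    constructor
    · rintro ⟨h1, h2⟩
      obtain ⟨vi, hvi, hmm⟩ := pvPc_eq_one h1 h2
      exact ⟨vi, hvi, hmm.symm⟩
    · rintro ⟨vi, hvi, rfl⟩
      exact ⟨Nat.pow_lt_pow_right (by norm_num) hvi, pvPc_pow hvi⟩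
  rw [hfil]
  have hinj : ∀ a ∈ Finset.range m, ∀ b ∈ Finset.range m, 2 ^ a = 2 ^ b → a = b :=
    fun a _ b _ hab => Nat.pow_right_injective (by norm_num) hab
  simp only [Finset.sum_image hinj]
  apply Finset.sum_congr rfl
  intro vi hvi
  have hz : ∀ li ∈ Finset.range m, li ≠ vi →
      pvP T V m (2 ^ vi) li * pvDfs T V m (2 ^ m - 1) (m - 1) (2 ^ vi) li = 0 := by
    intro li _ hne
    have hbf : (2 ^ vi).testBit li = false := by
      rw [Nat.testBit_two_pow]
      exact decide_eq_false (fun hh => hne hh.symm)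
    rw [pvP_not_bit hbf, zero_mul]
  rw [Finset.sum_eq_single_of_mem vi hvi hz, pvP_pow, one_mul]

lemma pvS_chain (T V : List Int) (m : Nat) :
    ∀ j, j ≤ m - 1 → pvS T V m (m - j) = pvS T V m m := by
  intro j
  induction j with
  | zero => intro _; rfl
  | succ j ih =>
    intro hj
    have h1 : 1 ≤ m - (j + 1) := by omega
    have h2 : m - (j + 1) < m := by omega
    have hstep := pvS_step T V m (m - (j + 1)) h1 h2
    have harith : m - (j + 1) + 1 = m - j := by omega
    rw [harith] at hstep
    rw [← ih (by omega)]
    exact hstep.symm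

-- ===== VERDICT (by name: the statement is the Claim_ definition above) =====
theorem ham_sub_spec : Claim_equal_ham_sub := by
  intro T V _ _
  unfold Spec_ham_sub
  by_cases hm : V.length ≤ 1
  · unfold ham_sub ham_sub_alt
    rw [if_pos hm, if_pos hm]
  · rw [pv_hamA T V hm, pv_hamB T V hm, ← pvS_top T V V.length,
      ← pvS_bot T V V.length]
    have hchain := pvS_chain T V V.length (V.length - 1) (le_refl _)
    have harith : V.length - (V.length - 1) = 1 := by omega
    rw [harith] at hchain
    exact hchain.symm
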